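-- pv_equiv track=rewrite | github.com/SHU-sy/studyLanguage | Python3/프로그래머스/0/181874. A 강조하기/A 강조하기.py | solution
-- ===== SOURCE A (Python) =====
-- def solution(myString):
--     answer = ''
--     for s in myString:
--         if s == "a":
--             answer += "A"
--         elif s == "A":
--             answer += s
--         else:
--             answer += s.lower()
--     return answer
-- ===== SOURCE B (Python) =====
-- def solution(myString):
--     return myString.lower().replace('a', 'A')
-- ===== Notes on version B (the rewrite author's own statement) =====
-- stated objective: idiomatic
-- what changed: Replaces the explicit per-character loop with three branches by two whole-string library passes: lower() then replace('a','A').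
import Mathlib
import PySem

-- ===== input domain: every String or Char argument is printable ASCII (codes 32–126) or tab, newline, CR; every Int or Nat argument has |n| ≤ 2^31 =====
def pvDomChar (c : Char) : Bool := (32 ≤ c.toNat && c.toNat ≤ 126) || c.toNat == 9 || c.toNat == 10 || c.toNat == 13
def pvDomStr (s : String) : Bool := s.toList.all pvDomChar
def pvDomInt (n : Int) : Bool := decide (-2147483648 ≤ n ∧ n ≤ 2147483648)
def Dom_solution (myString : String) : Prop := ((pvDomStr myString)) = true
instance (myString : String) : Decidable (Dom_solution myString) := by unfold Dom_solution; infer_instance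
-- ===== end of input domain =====

-- B replaces A's per-character loop (three branches) by two whole-string passes: lower() then replace('a','A').

-- ===== PORT A =====
def solution (myString : String) : String :=
  myString.toList.foldl
    (fun answer s =>
      if s = 'a' then answer ++ "A"
      else if s = 'A' then answer ++ String.singleton s
      else answer ++ PySem.Str.lower (String.singleton s))
    ""

-- ===== PORT B =====
def solution_alt (myString : String) : String :=
  PySem.Str.replace (PySem.Str.lower myString) "a" "A"

-- ===== PRECONDITION & SPEC =====
def Spec_solution (myString : String) (out : String) : Prop := out = solution_alt myString
instance (myString : String) (out : String) : Decidable (Spec_solution myString out) := by unfold Spec_solution; infer_instance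

-- ===== CLAIM (what is proved, stated in full; the proofs are below) =====
def Claim_equal_solution : Prop := ∀ (myString : String), Dom_solution myString → Spec_solution myString (solution myString)

-- ===== LEMMAS AND PROOFS =====

-- the per-character function A computes
def pvFA (c : Char) : Char :=
  if c = 'a' then 'A' else if c = 'A' then c else PySem.Chars.lowerChar c

lemma solution_toList_aux (l : List Char) (acc : String) :
    (l.foldl
      (fun answer s =>
        if s = 'a' then answer ++ "A"
        else if s = 'A' then answer ++ String.singleton s
        else answer ++ PySem.Str.lower (String.singleton s))
      acc).toList = acc.toList ++ l.map pvFA := by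
  induction l generalizing acc with
  | nil => simp
  | cons c t ih =>
      simp only [List.foldl_cons, List.map_cons]
      split_ifs with h1 h2
      · rw [ih]; simp [pvFA, h1]
      · rw [ih]; simp [pvFA, h2]
      · rw [ih]
        simp [pvFA, h1, h2, PySem.Str.lower, PySem.Chars.lower, String.singleton]

lemma replace_go_single (fuel : Nat) (l acc : List Char) (h : l.length <= fuel) :
    PySem.Chars.replace.go ['a'] ['A'] fuel l acc =
      acc.reverse ++ l.map (fun c => if c = 'a' then 'A' else c) := by
  induction fuel generalizing l acc with
  | zero =>
      have hl : l = [] := List.length_eq_zero_iff.mp (by omega)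
      subst hl; simp [PySem.Chars.replace.go]
  | succ n ih =>
      cases l with
      | nil => simp [PySem.Chars.replace.go]
      | cons c t =>
          simp only [PySem.Chars.replace.go]
          by_cases hc : c = 'a'
          · subst hc
            rw [if_pos (by simp [List.isPrefixOf])]
            simp only [List.length_cons] at h
            rw [show List.drop ['a'].length ('a' :: t) = t from rfl]
            rw [ih t _ (by omega)]
            simp
          · rw [if_neg (by
              simp only [List.isPrefixOf, Bool.and_true, beq_iff_eq]
              exact fun h => hc h.symm)]
            simp only [List.length_cons] at h
            rw [ih t _ (by omega)]
            simp [hc]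

lemma toNat_ofNat_valid (n : Nat) (h : n.isValidChar) : (Char.ofNat n).toNat = n := by
  simp [Char.ofNat, h, Char.ofNatAux, Char.toNat, UInt32.toNat_ofNatLT]

lemma pvFA_eq (c : Char) :
    pvFA c = (if PySem.Chars.lowerChar c = 'a' then 'A' else PySem.Chars.lowerChar c) := by
  by_cases h1 : c = 'a'
  · subst h1; decide
  · by_cases h2 : c = 'A'
    · subst h2; decide
    · have hp : pvFA c = PySem.Chars.lowerChar c := by simp [pvFA, h1, h2]
      rw [hp, if_neg]
      unfold PySem.Chars.lowerChar PySem.Chars.isupper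
      split_ifs with hu
      · intro hl
        simp only [decide_eq_true_eq, Bool.and_eq_true] at hu
        have h65 : 65 <= c.toNat := hu.1
        have h90 : c.toNat <= 90 := hu.2
        have hv : (c.toNat + 32).isValidChar := Or.inl (by omega)
        have := congrArg Char.toNat hl
        rw [toNat_ofNat_valid _ hv] at this
        have h97 : ('a').toNat = 97 := by decide
        rw [h97] at this
        have hc65 : c.toNat = 65 := by omega
        have hAe : c.toNat = ('A').toNat := by rw [hc65]; decide
        exact h2 (Char.ext (UInt32.toNat_inj.mp hAe))
      · exact h1

lemma solution_eq_alt (myString : String) : solution myString = solution_alt myString := by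
  have hB : (solution_alt myString).toList =
      (PySem.Chars.lower myString.toList).map (fun c => if c = 'a' then 'A' else c) := by
    unfold solution_alt
    rw [PySem.Str.toList_replace]
    have : ("a" : String).toList = ['a'] := by decide
    rw [PySem.Str.toList_lower]
    show PySem.Chars.replace (PySem.Chars.lower myString.toList) ("a").toList ("A").toList = _
    unfold PySem.Chars.replace
    rw [if_neg (by decide)]
    exact replace_go_single _ _ [] (le_refl _)
  have hA : (solution myString).toList = myString.toList.map pvFA :=
    by simpa using solution_toList_aux myString.toList ""
  have : (solution myString).toList = (solution_alt myString).toList := by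
    rw [hA, hB, PySem.Chars.lower, List.map_map]
    exact List.map_congr_left (fun c _ => pvFA_eq c)
  exact String.toList_inj.mp this

-- ===== VERDICT (by name: the statement is the Claim_ definition above) =====
theorem solution_spec : Claim_equal_solution := by
  intro s _
  exact solution_eq_alt s
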